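-- pv_equiv track=rewrite | github.com/epilectrik/voynich | phases/LABEL_INVESTIGATION/scripts/t1_extension_validation.py | extract_extension
-- ===== SOURCE A (Python) =====
-- def extract_extension(middle, pp_vocab):
--     """
--     Extract extension character(s) from RI MIDDLE.
--     Extension = the part that differs from PP base.
--     """
--     if not middle:
--         return None, None
--
--     if middle in pp_vocab:
--         return None, middle  # No extension, it IS PP
--
--     # Try to find PP base
--     # Check if middle starts with or ends with PP
--     for pp in sorted(pp_vocab, key=len, reverse=True):
--         if len(pp) < 2:
--             continue
--
--         # Check suffix extension (PP + ext)
--         if middle.startswith(pp) and len(middle) > len(pp):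
--             ext = middle[len(pp):]
--             return ext, pp
--
--         # Check prefix extension (ext + PP)
--         if middle.endswith(pp) and len(middle) > len(pp):
--             ext = middle[:-len(pp)]
--             return ext, pp
--
--     # No PP base found - might be compound or different structure
--     return None, None
-- ===== SOURCE B (Python) =====
-- def extract_extension(middle, pp_vocab):
--     """
--     Extract extension character(s) from RI MIDDLE.
--     Extension = the part that differs from PP base.
--     """
--     if not middle:
--         return None, None
--
--     # first-occurrence index of every vocab word, built once
--     index = {}
--     for i, w in enumerate(pp_vocab):
--         if w not in index:
--             index[w] = i
--
--     if middle in index: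
--         return None, middle  # No extension, it IS PP
--
--     n = len(middle)
--     lengths = set(len(w) for w in pp_vocab)
--     # candidate PP bases of length L are exactly middle[:L] and middle[-L:];
--     # scan lengths from longest to shortest (skipping lengths absent from the
--     # vocab), break ties by vocab position, preferring the prefix on an exact tie.
--     for L in range(n - 1, 1, -1):
--         if L not in lengths:
--             continue
--         p = middle[:L]
--         s = middle[-L:]
--         ip = index.get(p)
--         js = index.get(s)
--         if ip is not None and (js is None or ip <= js):
--             return middle[L:], p
--         if js is not None:
--             return middle[:n - L], s
--
--     return None, None
-- ===== Notes on version B (the rewrite author's own statement) =====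
-- stated objective: alternative
-- what changed: Instead of sorting the whole vocabulary by length and scanning it with startswith/endswith per entry, B builds a first-occurrence index and a length set of the vocabulary once and walks candidate lengths L = len(middle)-1 .. 2, looking up the only two possible length-L bases middle[:L] and middle[-L:] in that index (vocab position breaks ties, prefix preferred on an exact tie).
import Mathlib
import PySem

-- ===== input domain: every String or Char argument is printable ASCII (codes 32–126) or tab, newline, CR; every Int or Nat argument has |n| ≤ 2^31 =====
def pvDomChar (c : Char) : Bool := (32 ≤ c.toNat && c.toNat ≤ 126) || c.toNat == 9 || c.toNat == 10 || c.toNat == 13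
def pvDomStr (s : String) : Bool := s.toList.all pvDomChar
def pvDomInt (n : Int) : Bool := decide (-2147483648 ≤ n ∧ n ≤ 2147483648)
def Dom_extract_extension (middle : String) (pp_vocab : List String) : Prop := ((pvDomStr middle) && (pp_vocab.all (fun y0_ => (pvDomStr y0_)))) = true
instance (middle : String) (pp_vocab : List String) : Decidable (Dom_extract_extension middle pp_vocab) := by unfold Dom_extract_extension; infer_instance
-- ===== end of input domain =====

-- B replaces A's sort-then-scan (sort vocab by length, test startswith/endswith per entry) by a
-- first-occurrence index and a length set of the vocabulary plus a walk over candidate lengths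
-- L = len(middle)-1..2, looking up the only two possible length-L bases middle[:L] and middle[-L:]
-- (objective: alternative).

-- ===== PORT A =====
-- the 'for pp in sorted(pp_vocab, key=len, reverse=True)' loop body
def pvALoop (middle : String) : List String → Option String × Option String
  | [] => (none, none)
  | pp :: rest =>
    if PySem.Str.len pp < 2 then pvALoop middle rest
    else if PySem.Str.startswith middle pp && decide (PySem.Str.len pp < PySem.Str.len middle) then
      -- ext = middle[len(pp):]
      (some (PySem.Str.slice middle (some (PySem.Str.len pp)) none), some pp)
    else if PySem.Str.endswith middle pp && decide (PySem.Str.len pp < PySem.Str.len middle) then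
      -- ext = middle[:-len(pp)]
      (some (PySem.Str.slice middle none (some (-(PySem.Str.len pp)))), some pp)
    else pvALoop middle rest

def extract_extension (middle : String) (pp_vocab : List String) : Option String × Option String :=
  if middle.toList = [] then (none, none)
  else if middle ∈ pp_vocab then (none, some middle)
  else pvALoop middle (PySem.List.sorted pp_vocab (fun pp => PySem.Str.len pp) true)

-- ===== PORT B =====
-- index = {}; for i, w in enumerate(pp_vocab): if w not in index: index[w] = i
def pvBuildIndex (pp_vocab : List String) : PySem.Dict String Int :=
  (PySem.List.enumerate pp_vocab).foldl
    (fun d iw => if d.contains iw.2 then d else d.insert iw.2 iw.1) PySem.Dict.empty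

-- lengths = set(len(w) for w in pp_vocab)
def pvLens (pp_vocab : List String) : PySem.Set Int :=
  PySem.Set.ofList (pp_vocab.map (fun w => PySem.Str.len w))

-- for L in range(n - 1, 1, -1): …  (countdown recursion; the two `L < 2` cases are the empty
-- range; `if L not in lengths: continue` is the guard)
def pvBLoop (middle : String) (idx : PySem.Dict String Int) (lens : PySem.Set Int) :
    Nat → Option String × Option String
  | 0 => (none, none)
  | 1 => (none, none)
  | (L + 2) =>
    if lens.contains ((L + 2 : Nat) : Int) then
      let m := middle.toList
      let p := String.ofList (m.take (L + 2))                 -- middle[:L]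
      let s := String.ofList (m.drop (m.length - (L + 2)))    -- middle[-L:]
      match idx.get? p, idx.get? s with
      | some ip, some js =>
          if ip ≤ js then (some (String.ofList (m.drop (L + 2))), some p)
          else (some (String.ofList (m.take (m.length - (L + 2)))), some s)
      | some _, none => (some (String.ofList (m.drop (L + 2))), some p)
      | none, some _ => (some (String.ofList (m.take (m.length - (L + 2)))), some s)
      | none, none => pvBLoop middle idx lens (L + 1)
    else pvBLoop middle idx lens (L + 1)

def extract_extension_alt (middle : String) (pp_vocab : List String) : Option String × Option String :=
  if middle.toList = [] then (none, none)
  else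
    let idx := pvBuildIndex pp_vocab
    if idx.contains middle then (none, some middle)
    else
      let lens := pvLens pp_vocab
      pvBLoop middle idx lens (middle.toList.length - 1)

-- ===== PRECONDITION & SPEC =====
def Spec_extract_extension (middle : String) (pp_vocab : List String) (out : Option String × Option String) : Prop := out = extract_extension_alt middle pp_vocab
instance (middle : String) (pp_vocab : List String) (out : Option String × Option String) : Decidable (Spec_extract_extension middle pp_vocab out) := by unfold Spec_extract_extension; infer_instance

-- ===== CLAIM (what is proved, stated in full; the proofs are below) =====
def Claim_equal_extract_extension : Prop := ∀ (middle : String) (pp_vocab : List String), Dom_extract_extension middle pp_vocab → Spec_extract_extension middle pp_vocab (extract_extension middle pp_vocab)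

-- ===== LEMMAS AND PROOFS =====

-- A's per-element acceptance test, and the value it returns for an accepted element
def pvOk (middle : String) (w : String) : Bool :=
  !(PySem.Str.len w < 2) &&
  ((PySem.Str.startswith middle w || PySem.Str.endswith middle w) &&
    decide (PySem.Str.len w < PySem.Str.len middle))

def pvOut (middle : String) (w : String) : Option String × Option String :=
  if PySem.Str.startswith middle w && decide (PySem.Str.len w < PySem.Str.len middle) then
    (some (PySem.Str.slice middle (some (PySem.Str.len w)) none), some w)
  else
    (some (PySem.Str.slice middle none (some (-(PySem.Str.len w)))), some w)

-- first element of maximal length satisfying P, as a left fold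
def pvStepP (P : String → Bool) (acc : Option String) (w : String) : Option String :=
  if P w && (match acc with | none => true | some u => decide (u.toList.length < w.toList.length))
  then some w else acc

def pvOkL (middle : String) (L : Nat) (w : String) : Bool :=
  pvOk middle w && decide (w.toList.length ≤ L)

-- the level scan: at level L the only possible bases are middle[:L] and middle[-L:]
def pvSel (middle : String) (vocab : List String) : Nat → Option String
  | 0 => none
  | 1 => none
  | (L + 2) =>
    match vocab.find? (fun w =>
        w == String.ofList (middle.toList.take (L + 2)) ||
        w == String.ofList (middle.toList.drop (middle.toList.length - (L + 2)))) with
    | some w => some w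
    | none => pvSel middle vocab (L + 1)

lemma pvALoop_eq_find (middle : String) (l : List String) :
    pvALoop middle l = match l.find? (pvOk middle) with
      | none => (none, none)
      | some w => pvOut middle w := by
  induction l with
  | nil => simp [pvALoop]
  | cons pp rest ih =>
    by_cases h2 : pp.length ≤ 1 <;>
    by_cases hS : PySem.Chars.startswith middle.toList pp.toList = true <;>
    by_cases hE : PySem.Chars.endswith middle.toList pp.toList = true <;>
    by_cases hL : pp.length < middle.length <;>
    simp [pvALoop, pvOk, pvOut, PySem.Str.len, List.find?_cons, ih, h2, hS, hE, hL] <;>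
    omega
lemma pvInsertBy_split {α : Type} (b : α → α → Bool) (x : α) (l : List α) :
    PySem.List.insertBy b x l =
      l.takeWhile (fun y => !b x y) ++ x :: l.dropWhile (fun y => !b x y) := by
  induction l with
  | nil => simp [PySem.List.insertBy]
  | cons y ys ih =>
    by_cases h : b x y = true
    · simp [PySem.List.insertBy, h, List.takeWhile_cons, List.dropWhile_cons]
    · have h' : b x y = false := by simpa using h
      simp [PySem.List.insertBy, h', List.takeWhile_cons, List.dropWhile_cons, ih]

lemma pvDropWhile_lt (x : String) (S : List String)
    (hP : S.Pairwise (fun a b => PySem.Str.len b ≤ PySem.Str.len a)) :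
    ∀ y ∈ S.dropWhile (fun y => !(decide (PySem.Str.len y < PySem.Str.len x))),
      PySem.Str.len y < PySem.Str.len x := by
  induction S with
  | nil => simp
  | cons s S' ih =>
    rcases List.pairwise_cons.mp hP with ⟨hs, hP'⟩
    by_cases h : PySem.Str.len s < PySem.Str.len x
    · intro y hy
      simp only [List.dropWhile_cons, h, decide_true, Bool.not_true, Bool.false_eq_true,
        if_false] at hy
      rcases List.mem_cons.mp hy with rfl | hy'
      · exact h
      · exact lt_of_le_of_lt (hs y hy') h
    · intro y hy
      simp only [List.dropWhile_cons, h, decide_false, Bool.not_false, if_true] at hy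
      exact ih hP' y hy

lemma pvFind_sorted_eq_best (middle : String) (l : List String) :
    (PySem.List.sorted l (fun pp => PySem.Str.len pp) true).find? (pvOk middle)
      = l.foldl (pvStepP (pvOk middle)) none := by
  induction l using List.reverseRecOn with
  | nil => simp [PySem.List.sorted]
  | append_singleton v x ih =>
    have hsortapp : PySem.List.sorted (v ++ [x]) (fun pp => PySem.Str.len pp) true
        = PySem.List.insertBy (fun a b => decide (PySem.Str.len b < PySem.Str.len a)) x
            (PySem.List.sorted v (fun pp => PySem.Str.len pp) true) := by
      rw [PySem.List.sorted_rev_eq_foldl_insertBy, PySem.List.sorted_rev_eq_foldl_insertBy,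
        List.foldl_append]
      rfl
    set S := PySem.List.sorted v (fun pp => PySem.Str.len pp) true with hSdef
    have hP : S.Pairwise (fun a b => PySem.Str.len b ≤ PySem.Str.len a) :=
      PySem.List.sorted_pairwise_rev v _
    have hsplit := pvInsertBy_split (fun a b => decide (PySem.Str.len b < PySem.Str.len a)) x S
    set q : String → Bool := fun y => !(decide (PySem.Str.len y < PySem.Str.len x)) with hq
    have hSsplit : S = S.takeWhile q ++ S.dropWhile q := (List.takeWhile_append_dropWhile).symm
    rw [hsortapp, hsplit, List.foldl_append]
    simp only [List.foldl_cons, List.foldl_nil]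
    rw [← ih]
    rw [List.find?_append, List.find?_cons]
    conv_rhs => rw [hSsplit, List.find?_append]
    cases hA : (S.takeWhile q).find? (pvOk middle) with
    | some w =>
      have hw : PySem.Str.len x ≤ PySem.Str.len w := by
        have := List.mem_takeWhile_imp (List.mem_of_find?_eq_some hA)
        simp only [hq, Bool.not_eq_true', decide_eq_false_iff_not, not_lt] at this
        exact this
      have hw' : x.length ≤ w.length := by
        simp only [PySem.Str.len, Nat.cast_le, String.length_toList] at hw
        exact hw
      have hlt : ¬ (w.length < x.length) := by omega
      simp [pvStepP, hlt]
    | none =>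
      simp only [Option.or]
      have hB : ∀ u, (S.dropWhile q).find? (pvOk middle) = some u →
          u.length < x.length := by
        intro u hu
        have := pvDropWhile_lt x S hP u (List.mem_of_find?_eq_some hu)
        simp only [PySem.Str.len, Nat.cast_lt, String.length_toList] at this
        exact this
      by_cases hx : pvOk middle x = true
      · cases hu : (S.dropWhile q).find? (pvOk middle) with
        | none => simp [hx, hu, pvStepP]
        | some u => simp [hx, hu, pvStepP, hB u hu]
      · have hx' : pvOk middle x = false := by simpa using hx
        cases hu : (S.dropWhile q).find? (pvOk middle) with
        | none => simp [hx', hu, pvStepP]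
        | some u => simp [hx', hu, pvStepP]
lemma pvFold_const (P : String → Bool) (l : List String) (u : String)
    (hmax : ∀ w, P w = true → w.length ≤ u.length) :
    l.foldl (pvStepP P) (some u) = some u := by
  induction l with
  | nil => rfl
  | cons w l' ih =>
    have hstep : pvStepP P (some u) w = some u := by
      by_cases hw : P w = true
      · have := hmax w hw
        simp [pvStepP, hw]
        omega
      · simp [pvStepP, (Bool.not_eq_true _).mp hw]
    simp [List.foldl_cons, hstep, ih]

lemma pvFold_find (P : String → Bool) (L : Nat)
    (hbound : ∀ w, P w = true → w.length ≤ L) (w₀ : String) :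
    ∀ (l : List String) (acc : Option String),
      (acc = none ∨ ∃ u, acc = some u ∧ u.length < L) →
      l.find? (fun w => P w && decide (w.toList.length = L)) = some w₀ →
      l.foldl (pvStepP P) acc = some w₀ := by
  intro l
  induction l with
  | nil => intro acc _ h; simp at h
  | cons w l' ih =>
    intro acc hacc hf
    by_cases hw : (P w && decide (w.toList.length = L)) = true
    · rw [List.find?_cons_of_pos (p := fun w => P w && decide (w.toList.length = L)) hw] at hf
      obtain rfl : w = w₀ := by simpa using hf
      simp only [Bool.and_eq_true, decide_eq_true_eq, String.length_toList] at hw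
      have hstep : pvStepP P acc w = some w := by
        rcases hacc with rfl | ⟨u, rfl, hu⟩
        · simp [pvStepP, hw.1]
        · simp [pvStepP, hw.1]
          omega
      simp only [List.foldl_cons, hstep]
      exact pvFold_const P l' w (fun v hv => by have := hbound v hv; omega)
    · rw [List.find?_cons_of_neg (p := fun w => P w && decide (w.toList.length = L)) hw] at hf
      simp only [Bool.and_eq_true, decide_eq_true_eq, String.length_toList, not_and] at hw
      have hacc' : pvStepP P acc w = none ∨ ∃ u, pvStepP P acc w = some u ∧ u.length < L := by
        by_cases hP : P w = true
        · have hlt : w.length < L := lt_of_le_of_ne (hbound w hP) (hw hP)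
          unfold pvStepP
          rcases hacc with rfl | ⟨u, rfl, hu⟩
          · right; exact ⟨w, by simp [hP], hlt⟩
          · by_cases hc : u.length < w.length
            · right; exact ⟨w, by simp [hP, hc], hlt⟩
            · right; exact ⟨u, by simp [hP, hc], hu⟩
        · unfold pvStepP
          simp [(Bool.not_eq_true _).mp hP]
          exact hacc
      exact ih _ hacc' hf

lemma pvFold_none (P : String → Bool) (l : List String)
    (h : ∀ w ∈ l, P w = false) :
    l.foldl (pvStepP P) none = none := by
  induction l with
  | nil => rfl
  | cons w l' ih =>
    have : pvStepP P none w = none := by simp [pvStepP, h w (List.mem_cons_self)]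
    simp only [List.foldl_cons, this]
    exact ih (fun v hv => h v (List.mem_cons_of_mem _ hv))

-- at level L+2 (< len middle), the acceptable bases of length exactly L+2 are middle[:L+2] and middle[-(L+2):]
lemma pvLevel_char (middle : String) (L : Nat) (hL : L + 2 < middle.toList.length) (w : String) :
    (pvOkL middle (L + 2) w && decide (w.toList.length = L + 2))
      = (w == String.ofList (middle.toList.take (L + 2)) ||
         w == String.ofList (middle.toList.drop (middle.toList.length - (L + 2)))) := by
  by_cases hOr : (w == String.ofList (middle.toList.take (L + 2)) ||
      w == String.ofList (middle.toList.drop (middle.toList.length - (L + 2)))) = true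
  case neg =>
    rw [(Bool.not_eq_true _).mp hOr]
    have hOr' := (Bool.not_eq_true _).mp hOr
    simp only [Bool.or_eq_false_iff, beq_eq_false_iff_ne, ne_eq] at hOr'
    obtain ⟨hp, hs⟩ := hOr'
    by_cases hlen : w.toList.length = L + 2
    · have h1 : PySem.Chars.startswith middle.toList w.toList = false := by
        by_cases hb : PySem.Chars.startswith middle.toList w.toList = true
        · exfalso
          have : w.toList = middle.toList.take (L + 2) := by
            have hpre : w.toList <+: middle.toList := (PySem.Chars.startswith_iff _ _).mp hb
            have := List.prefix_iff_eq_take.mp hpre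
            rwa [hlen] at this
          exact hp (String.toList_inj.mp (by simp [this]))
        · exact (Bool.not_eq_true _).mp hb
      have h2 : PySem.Chars.endswith middle.toList w.toList = false := by
        by_cases hb : PySem.Chars.endswith middle.toList w.toList = true
        · exfalso
          have : w.toList = middle.toList.drop (middle.toList.length - (L + 2)) := by
            have hsuf : w.toList <:+ middle.toList := (PySem.Chars.endswith_iff _ _).mp hb
            have := List.suffix_iff_eq_drop.mp hsuf
            rwa [hlen] at this
          exact hs (String.toList_inj.mp (by simp [this]))
        · exact (Bool.not_eq_true _).mp hb
      simp only [pvOkL, pvOk, PySem.Str.len, PySem.Str.startswith_eq, PySem.Str.endswith_eq]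
      simp [h1, h2]
    · have hlen' : ¬ w.length = L + 2 := by simpa using hlen
      simp [pvOkL, hlen']
  case pos =>
    rw [hOr]
    rw [Bool.or_eq_true] at hOr
    have key : ∀ cs : List Char, cs <+: middle.toList ∨ cs <:+ middle.toList →
        cs.length = L + 2 → w = String.ofList cs →
        (pvOkL middle (L + 2) w && decide (w.toList.length = L + 2)) = true := by
      intro cs hfix hlen hw
      subst hw
      have htl : (String.ofList cs).toList = cs := by simp
      simp only [pvOkL, pvOk, PySem.Str.len, PySem.Str.startswith_eq, PySem.Str.endswith_eq, htl,
        Bool.and_eq_true, decide_eq_true_eq, Bool.or_eq_true, Bool.not_eq_eq_eq_not, Bool.not_true,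
        decide_eq_false_iff_not, not_lt]
      refine ⟨⟨⟨by omega, ?_, by omega⟩, by omega⟩, hlen⟩
      rcases hfix with h | h
      · exact Or.inl ((PySem.Chars.startswith_iff _ _).mpr h)
      · exact Or.inr ((PySem.Chars.endswith_iff _ _).mpr h)
    rcases hOr with h | h
    · have hw : w = String.ofList (middle.toList.take (L + 2)) := by simpa using h
      exact key _ (Or.inl (List.take_prefix _ _)) (by rw [List.length_take]; omega) hw
    · have hw : w = String.ofList (middle.toList.drop (middle.toList.length - (L + 2))) := by
        simpa using h
      exact key _ (Or.inr (List.drop_suffix _ _)) (by rw [List.length_drop]; omega) hw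

lemma pvBest_sel (middle : String) (vocab : List String) (L : Nat)
    (hL : L < middle.toList.length) :
    vocab.foldl (pvStepP (pvOkL middle L)) none = pvSel middle vocab L := by
  induction L using Nat.strong_induction_on with
  | _ L ih =>
    match L, hL with
    | 0, hL =>
      rw [show pvSel middle vocab 0 = none from rfl]
      refine pvFold_none _ _ (fun w _ => ?_)
      simp [pvOkL, pvOk, PySem.Str.len, String.length_toList]
      intro h _ _ hw
      rw [hw] at h
      simp at h
    | 1, hL =>
      rw [show pvSel middle vocab 1 = none from rfl]
      exact pvFold_none _ _ (fun w _ => by simp [pvOkL, pvOk, PySem.Str.len, String.length_toList]; intros; omega)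
    | (L + 2), hL =>
      have hchar := pvLevel_char middle L hL
      have hpred : (fun w => pvOkL middle (L + 2) w && decide (w.toList.length = L + 2))
          = (fun w => w == String.ofList (middle.toList.take (L + 2)) ||
              w == String.ofList (middle.toList.drop (middle.toList.length - (L + 2)))) :=
        funext hchar
      cases hf : vocab.find? (fun w =>
          w == String.ofList (middle.toList.take (L + 2)) ||
          w == String.ofList (middle.toList.drop (middle.toList.length - (L + 2)))) with
      | some w =>
        have : vocab.find? (fun w => pvOkL middle (L + 2) w && decide (w.toList.length = L + 2))
            = some w := by rw [hpred]; exact hf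
        rw [show pvSel middle vocab (L + 2)
            = (match vocab.find? (fun w =>
                w == String.ofList (middle.toList.take (L + 2)) ||
                w == String.ofList (middle.toList.drop (middle.toList.length - (L + 2)))) with
              | some w => some w
              | none => pvSel middle vocab (L + 1)) from rfl, hf]
        exact pvFold_find _ (L + 2)
          (fun v hv => by
            simp only [pvOkL, Bool.and_eq_true, decide_eq_true_eq, String.length_toList] at hv
            exact hv.2) w vocab none (Or.inl rfl) this
      | none =>
        rw [show pvSel middle vocab (L + 2)
            = (match vocab.find? (fun w =>
                w == String.ofList (middle.toList.take (L + 2)) ||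
                w == String.ofList (middle.toList.drop (middle.toList.length - (L + 2)))) with
              | some w => some w
              | none => pvSel middle vocab (L + 1)) from rfl, hf]
        have hnone := List.find?_eq_none.mp hf
        have hcong : ∀ (acc : Option String), ∀ w ∈ vocab,
            pvStepP (pvOkL middle (L + 2)) acc w = pvStepP (pvOkL middle (L + 1)) acc w := by
          intro acc w hw
          have heq : pvOkL middle (L + 2) w = pvOkL middle (L + 1) w := by
            by_cases hlen : w.toList.length = L + 2
            · have : (pvOkL middle (L + 2) w && decide (w.toList.length = L + 2)) = false := by
                rw [hchar w]
                simpa using hnone w hw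
              simp only [hlen, decide_true, Bool.and_true] at this
              rw [this]
              simp only [pvOkL, String.length_toList]
              simp only [String.length_toList] at hlen
              simp [hlen]
            · simp only [pvOkL, String.length_toList]
              simp only [String.length_toList] at hlen
              by_cases hle : w.length ≤ L + 1
              · have : w.length ≤ L + 2 := by omega
                simp [hle, this]
              · have h1 : ¬ w.length ≤ L + 2 := by omega
                simp [hle, h1]
          simp [pvStepP, heq]
        rw [PySem.List.foldl_congr_mem vocab _ _ none (fun acc w hw => hcong acc w hw)]
        exact ih (L + 1) (by omega) (by omega)
lemma pvIndex_get_gen (l : List String) :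
    ∀ (k : Int) (d : PySem.Dict String Int) (w : String),
    ((PySem.List.enumerate l k).foldl
        (fun d iw => if d.contains iw.2 then d else d.insert iw.2 iw.1) d).get? w
      = (d.get? w).or ((List.idxOf? w l).map (fun j => k + j)) := by
  induction l with
  | nil => intro k d w; simp [PySem.List.enumerate]
  | cons x l' ih =>
    intro k d w
    have henum : PySem.List.enumerate (x :: l') k = (k, x) :: PySem.List.enumerate l' (k + 1) := by
      simp [PySem.List.enumerate]
    rw [henum, List.foldl_cons]
    by_cases hc : d.contains x = true
    · rw [if_pos hc, ih]
      by_cases hw : x = w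
      · subst hw
        have : (d.get? x).isSome := by rw [← PySem.Dict.contains_eq_isSome_get?]; exact hc
        obtain ⟨v, hv⟩ := Option.isSome_iff_exists.mp this
        simp [hv]
      · rw [List.idxOf?_cons]
        simp only [show (x == w) = false from beq_eq_false_iff_ne.mpr hw, Bool.false_eq_true,
          if_false, Option.map_map]
        congr 1
        cases List.idxOf? w l' with
        | none => rfl
        | some j => simp; omega
    · rw [if_neg hc, ih]
      have hdx : d.get? x = none :=
        (PySem.Dict.get?_eq_none_iff_contains d x).mpr ((Bool.not_eq_true _).mp hc)
      by_cases hw : x = w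
      · subst hw
        rw [PySem.Dict.get?_insert_self, hdx, List.idxOf?_cons]
        simp
      · rw [PySem.Dict.get?_insert_of_ne d _ (fun h => hw h.symm), List.idxOf?_cons]
        simp only [show (x == w) = false from beq_eq_false_iff_ne.mpr hw, Bool.false_eq_true,
          if_false, Option.map_map]
        congr 1
        cases List.idxOf? w l' with
        | none => rfl
        | some j => simp; omega

lemma pvFind_two (l : List String) (p s : String) :
    l.find? (fun w => w == p || w == s) =
      match List.idxOf? p l, List.idxOf? s l with
      | some i, some j => if i ≤ j then some p else some s
      | some _, none => some p
      | none, some _ => some s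
      | none, none => none := by
  induction l with
  | nil => simp
  | cons x l' ih =>
    by_cases hp : x = p
    · subst hp
      rw [List.find?_cons_of_pos (by simp)]
      rw [List.idxOf?_cons]
      simp only [BEq.rfl, if_true]
      cases hs : List.idxOf? s (x :: l') with
      | none => rfl
      | some j => simp
    · by_cases hs : x = s
      · subst hs
        rw [List.find?_cons_of_pos (by simp)]
        rw [List.idxOf?_cons, List.idxOf?_cons]
        simp only [show (x == p) = false from beq_eq_false_iff_ne.mpr hp, BEq.rfl,
          Bool.false_eq_true, if_false, if_true]
        cases hj : List.idxOf? p l' with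
        | none => simp
        | some i => simp
      · rw [List.find?_cons_of_neg (by simp [hp, hs])]
        rw [List.idxOf?_cons, List.idxOf?_cons]
        simp only [show (x == p) = false from beq_eq_false_iff_ne.mpr hp,
          show (x == s) = false from beq_eq_false_iff_ne.mpr hs, Bool.false_eq_true, if_false]
        rw [ih]
        cases hi : List.idxOf? p l' with
        | none => cases hj : List.idxOf? s l' with
          | none => rfl
          | some j => rfl
        | some i => cases hj : List.idxOf? s l' with
          | none => rfl
          | some j => by_cases hij : i ≤ j <;> simp [hij]
lemma pvIndex_get (vocab : List String) (w : String) :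
    (pvBuildIndex vocab).get? w = (List.idxOf? w vocab).map (Nat.cast : Nat → Int) := by
  unfold pvBuildIndex
  rw [pvIndex_get_gen]
  rw [PySem.Dict.get?_empty, Option.none_or]
  cases List.idxOf? w vocab <;> simp

lemma pvP_len (middle : String) (L : Nat) (hL : L + 2 < middle.toList.length) :
    (String.ofList (middle.toList.take (L + 2))).toList.length = L + 2 := by
  simp only [String.toList_ofList, List.length_take]
  omega

lemma pvS_len (middle : String) (L : Nat) (hL : L + 2 < middle.toList.length) :
    (String.ofList (middle.toList.drop (middle.toList.length - (L + 2)))).toList.length = L + 2 := by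
  simp only [String.toList_ofList, List.length_drop]
  omega

lemma pvOut_p (middle : String) (L : Nat) (hL : L + 2 < middle.toList.length) :
    pvOut middle (String.ofList (middle.toList.take (L + 2)))
      = (some (String.ofList (middle.toList.drop (L + 2))),
         some (String.ofList (middle.toList.take (L + 2)))) := by
  have hplen := pvP_len middle L hL
  have hsw : PySem.Str.startswith middle (String.ofList (middle.toList.take (L + 2))) = true := by
    rw [PySem.Str.startswith_eq]
    exact (PySem.Chars.startswith_iff _ _).mpr (by simp [List.take_prefix])
  have hlt : PySem.Str.len (String.ofList (middle.toList.take (L + 2))) < PySem.Str.len middle := by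
    simp only [PySem.Str.len, String.length_toList] at *
    omega
  unfold pvOut
  have hn : L + 2 < middle.length := by simpa using hL
  rw [if_pos (by
    simp only [PySem.Str.startswith_eq, String.toList_ofList, String.length_toList] at hsw
    simp [hsw, PySem.Str.len, String.toList_ofList, List.length_take, String.length_toList]
    omega)]
  have hlen2 : PySem.Str.len (String.ofList (middle.toList.take (L + 2))) = ((L + 2 : Nat) : Int) := by
    simp only [PySem.Str.len, hplen]
  rw [hlen2]
  simp only [PySem.Str.slice, PySem.Chars.slice_eq_listSlice, PySem.List.slice_from_natCast]

lemma pvOut_s (middle : String) (L : Nat) (hL : L + 2 < middle.toList.length)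
    (hne : String.ofList (middle.toList.take (L + 2))
          ≠ String.ofList (middle.toList.drop (middle.toList.length - (L + 2)))) :
    pvOut middle (String.ofList (middle.toList.drop (middle.toList.length - (L + 2))))
      = (some (String.ofList (middle.toList.take (middle.toList.length - (L + 2)))),
         some (String.ofList (middle.toList.drop (middle.toList.length - (L + 2))))) := by
  have hslen := pvS_len middle L hL
  have hsw : PySem.Str.startswith middle
      (String.ofList (middle.toList.drop (middle.toList.length - (L + 2)))) = false := by
    by_cases hb : PySem.Str.startswith middle
        (String.ofList (middle.toList.drop (middle.toList.length - (L + 2)))) = true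
    · exfalso
      rw [PySem.Str.startswith_eq] at hb
      have hpre := (PySem.Chars.startswith_iff _ _).mp hb
      have := List.prefix_iff_eq_take.mp hpre
      rw [hslen] at this
      exact hne (String.toList_inj.mp (by simp [← this]))
    · exact (Bool.not_eq_true _).mp hb
  unfold pvOut
  have hn : L + 2 < middle.length := by simpa using hL
  rw [if_neg (by
    simp only [PySem.Str.startswith_eq, String.toList_ofList, String.length_toList] at hsw
    simp [hsw, PySem.Str.len, String.toList_ofList, String.length_toList])]
  have hlen2 : PySem.Str.len (String.ofList (middle.toList.drop (middle.toList.length - (L + 2))))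
      = ((L + 2 : Nat) : Int) := by
    simp only [PySem.Str.len, hslen]
  rw [hlen2]
  rw [show (-((L + 2 : Nat) : Int)) = -(((L + 2 : Nat) : Int)) from rfl]
  simp only [PySem.Str.slice, PySem.Chars.slice_eq_listSlice]
  rw [PySem.List.slice_to_neg_natCast _ _ (by omega)]

lemma pvBLoop_eq_sel (middle : String) (vocab : List String) (L : Nat)
    (hL : L < middle.toList.length) :
    pvBLoop middle (pvBuildIndex vocab) (pvLens vocab) L =
      match pvSel middle vocab L with
      | none => (none, none)
      | some w => pvOut middle w := by
  induction L using Nat.strong_induction_on with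
  | _ L ih =>
    match L, hL with
    | 0, hL => rfl
    | 1, hL => rfl
    | (L + 2), hL =>
      by_cases hg : (pvLens vocab).contains ((L + 2 : Nat) : Int) = true
      case neg =>
        have hstep : pvBLoop middle (pvBuildIndex vocab) (pvLens vocab) (L + 2)
            = pvBLoop middle (pvBuildIndex vocab) (pvLens vocab) (L + 1) := by
          conv_lhs => rw [pvBLoop]
          rw [if_neg hg]
        have hnone : vocab.find? (fun w =>
            w == String.ofList (middle.toList.take (L + 2)) ||
            w == String.ofList (middle.toList.drop (middle.toList.length - (L + 2)))) = none := by
          rw [List.find?_eq_none]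
          intro w hw hcontra
          rw [Bool.or_eq_true] at hcontra
          have hlw : PySem.Str.len w = ((L + 2 : Nat) : Int) := by
            rcases hcontra with h | h
            · have hww : w = String.ofList (middle.toList.take (L + 2)) := by simpa using h
              rw [hww]
              simp only [PySem.Str.len, pvP_len middle L hL]
            · have hww : w = String.ofList (middle.toList.drop (middle.toList.length - (L + 2))) := by
                simpa using h
              rw [hww]
              simp only [PySem.Str.len, pvS_len middle L hL]
          apply hg
          have hmem : ((L + 2 : Nat) : Int) ∈ vocab.map (fun w => PySem.Str.len w) :=
            List.mem_map.mpr ⟨w, hw, hlw⟩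
          have hmem2 : ((L + 2 : Nat) : Int) ∈ pvLens vocab :=
            (PySem.Set.mem_ofList _ _).mpr hmem
          exact List.elem_eq_true_of_mem hmem2
        have hsel2 : pvSel middle vocab (L + 2) = pvSel middle vocab (L + 1) := by
          rw [show pvSel middle vocab (L + 2)
              = (match vocab.find? (fun w =>
                  w == String.ofList (middle.toList.take (L + 2)) ||
                  w == String.ofList (middle.toList.drop (middle.toList.length - (L + 2)))) with
                | some w => some w
                | none => pvSel middle vocab (L + 1)) from rfl, hnone]
        rw [hstep, hsel2]
        exact ih (L + 1) (by omega) (by omega)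
      case pos =>
      have hup : pvBLoop middle (pvBuildIndex vocab) (pvLens vocab) (L + 2)
          = (match (pvBuildIndex vocab).get? (String.ofList (middle.toList.take (L + 2))),
                  (pvBuildIndex vocab).get? (String.ofList (middle.toList.drop (middle.toList.length - (L + 2)))) with
             | some ip, some js =>
                 if ip ≤ js then
                   (some (String.ofList (middle.toList.drop (L + 2))),
                    some (String.ofList (middle.toList.take (L + 2))))
                 else
                   (some (String.ofList (middle.toList.take (middle.toList.length - (L + 2)))),
                    some (String.ofList (middle.toList.drop (middle.toList.length - (L + 2)))))
             | some _, none =>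
                 (some (String.ofList (middle.toList.drop (L + 2))),
                  some (String.ofList (middle.toList.take (L + 2))))
             | none, some _ =>
                 (some (String.ofList (middle.toList.take (middle.toList.length - (L + 2)))),
                  some (String.ofList (middle.toList.drop (middle.toList.length - (L + 2)))))
             | none, none => pvBLoop middle (pvBuildIndex vocab) (pvLens vocab) (L + 1)) := by
        conv_lhs => rw [pvBLoop]
        rw [if_pos hg]
      rw [hup]
      have hsel : pvSel middle vocab (L + 2)
          = (match vocab.find? (fun w =>
              w == String.ofList (middle.toList.take (L + 2)) ||
              w == String.ofList (middle.toList.drop (middle.toList.length - (L + 2)))) with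
            | some w => some w
            | none => pvSel middle vocab (L + 1)) := rfl
      rw [hsel, pvFind_two, pvIndex_get, pvIndex_get]
      cases hi : List.idxOf? (String.ofList (middle.toList.take (L + 2))) vocab with
      | none =>
        cases hj : List.idxOf? (String.ofList (middle.toList.drop (middle.toList.length - (L + 2)))) vocab with
        | none =>
          simp only [Option.map_none]
          exact ih (L + 1) (by omega) (by omega)
        | some j =>
          have hne : String.ofList (middle.toList.take (L + 2))
              ≠ String.ofList (middle.toList.drop (middle.toList.length - (L + 2))) := by
            intro h
            rw [h, hj] at hi
            simp at hi
          simp only [Option.map_none, Option.map_some]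
          exact (pvOut_s middle L hL hne).symm
      | some i =>
        cases hj : List.idxOf? (String.ofList (middle.toList.drop (middle.toList.length - (L + 2)))) vocab with
        | none =>
          simp only [Option.map_none, Option.map_some]
          exact (pvOut_p middle L hL).symm
        | some j =>
          simp only [Option.map_some]
          by_cases hij : i ≤ j
          · rw [if_pos (show (i:Int) ≤ (j:Int) by omega), if_pos hij]
            exact (pvOut_p middle L hL).symm
          · have hne : String.ofList (middle.toList.take (L + 2))
                ≠ String.ofList (middle.toList.drop (middle.toList.length - (L + 2))) := by
              intro h
              rw [h, hj] at hi
              obtain rfl : j = i := by simpa using hi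
              exact hij le_rfl
            rw [if_neg (show ¬ (i:Int) ≤ (j:Int) by omega), if_neg hij]
            exact (pvOut_s middle L hL hne).symm

-- ===== VERDICT (by name: the statement is the Claim_ definition above) =====
lemma pvOk_eq_okL (middle : String) (w : String) :
    pvOk middle w = pvOkL middle (middle.toList.length - 1) w := by
  unfold pvOkL
  by_cases h : pvOk middle w = true
  · rw [h, Bool.true_and]
    have : w.toList.length < middle.toList.length := by
      simp only [pvOk, PySem.Str.len, Bool.and_eq_true, decide_eq_true_eq] at h
      exact_mod_cast h.2.2
    simp only [String.length_toList] at *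
    simp
    omega
  · rw [(Bool.not_eq_true _).mp h, Bool.false_and]

theorem extract_extension_spec : Claim_equal_extract_extension := by
  intro middle vocab _
  unfold Spec_extract_extension
  unfold extract_extension extract_extension_alt
  by_cases hm : middle.toList = []
  · rw [if_pos hm, if_pos hm]
  · rw [if_neg hm, if_neg hm]
    have hn : 0 < middle.toList.length := List.length_pos_iff.mpr hm
    by_cases hmem : middle ∈ vocab
    · have hio : (List.idxOf? middle vocab).isSome := by
        cases hio : List.idxOf? middle vocab with
        | none => exact absurd (List.idxOf?_eq_none_iff.mp hio) (by simpa using hmem)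
        | some i => rfl
      have hcont : (pvBuildIndex vocab).contains middle = true := by
        rw [PySem.Dict.contains_eq_isSome_get?, pvIndex_get]
        cases hio' : List.idxOf? middle vocab with
        | none => rw [hio'] at hio; simp at hio
        | some i => simp
      rw [if_pos hmem]
      simp only [hcont]
      simp
    · have hcont : (pvBuildIndex vocab).contains middle = false := by
        rw [PySem.Dict.contains_eq_isSome_get?, pvIndex_get]
        rw [List.idxOf?_eq_none_iff.mpr hmem]
        rfl
      rw [if_neg hmem]
      simp only [hcont, Bool.false_eq_true, if_false]
      rw [pvALoop_eq_find, pvFind_sorted_eq_best]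
      rw [PySem.List.foldl_congr_mem vocab (pvStepP (pvOk middle))
        (pvStepP (pvOkL middle (middle.toList.length - 1))) none
        (fun acc w _ => by unfold pvStepP; rw [pvOk_eq_okL])]
      rw [pvBest_sel middle vocab _ (by omega)]
      rw [pvBLoop_eq_sel middle vocab _ (by omega)]
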